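-- pv_equiv track=rewrite | github.com/merijnkok959595/app.screentimejourney | aws_lambda_api/milestone_notifications.py | get_timezone_from_phone
-- ===== SOURCE A (Python) =====
-- def get_timezone_from_phone(phone: str) -> str:
--     """Get timezone based on phone country code (FALLBACK ONLY)"""
--     phone_clean = phone.replace('+', '').replace(' ', '').replace('-', '')
--
--     timezone_map = {
--         '31': 'Europe/Amsterdam', '32': 'Europe/Brussels', '33': 'Europe/Paris',
--         '34': 'Europe/Madrid', '39': 'Europe/Rome', '44': 'Europe/London',
--         '49': 'Europe/Berlin', '46': 'Europe/Stockholm', '47': 'Europe/Oslo',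
--         '45': 'Europe/Copenhagen', '358': 'Europe/Helsinki', '48': 'Europe/Warsaw',
--         '43': 'Europe/Vienna', '41': 'Europe/Zurich', '351': 'Europe/Lisbon',
--         '30': 'Europe/Athens', '353': 'Europe/Dublin', '1': 'America/New_York',
--         '52': 'America/Mexico_City', '55': 'America/Sao_Paulo',
--         '54': 'America/Argentina/Buenos_Aires', '56': 'America/Santiago',
--         '57': 'America/Bogota', '51': 'America/Lima', '61': 'Australia/Sydney',
--         '64': 'Pacific/Auckland', '81': 'Asia/Tokyo', '86': 'Asia/Shanghai',
--         '91': 'Asia/Kolkata', '65': 'Asia/Singapore', '852': 'Asia/Hong_Kong',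
--         '66': 'Asia/Bangkok', '63': 'Asia/Manila', '62': 'Asia/Jakarta',
--         '60': 'Asia/Kuala_Lumpur', '84': 'Asia/Ho_Chi_Minh', '82': 'Asia/Seoul',
--         '971': 'Asia/Dubai', '966': 'Asia/Riyadh', '972': 'Asia/Jerusalem',
--         '90': 'Europe/Istanbul', '27': 'Africa/Johannesburg', '20': 'Africa/Cairo',
--         '234': 'Africa/Lagos', '254': 'Africa/Nairobi',
--     }
--
--     for length in [3, 2, 1]:
--         code = phone_clean[:length]
--         if code in timezone_map:
--             return timezone_map[code]
--
--     return 'UTC'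
-- ===== SOURCE B (Python) =====
-- _TZ_ITEMS = [
--     ('31', 'Europe/Amsterdam'), ('32', 'Europe/Brussels'), ('33', 'Europe/Paris'),
--     ('34', 'Europe/Madrid'), ('39', 'Europe/Rome'), ('44', 'Europe/London'),
--     ('49', 'Europe/Berlin'), ('46', 'Europe/Stockholm'), ('47', 'Europe/Oslo'),
--     ('45', 'Europe/Copenhagen'), ('358', 'Europe/Helsinki'), ('48', 'Europe/Warsaw'),
--     ('43', 'Europe/Vienna'), ('41', 'Europe/Zurich'), ('351', 'Europe/Lisbon'),
--     ('30', 'Europe/Athens'), ('353', 'Europe/Dublin'), ('1', 'America/New_York'),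
--     ('52', 'America/Mexico_City'), ('55', 'America/Sao_Paulo'),
--     ('54', 'America/Argentina/Buenos_Aires'), ('56', 'America/Santiago'),
--     ('57', 'America/Bogota'), ('51', 'America/Lima'), ('61', 'Australia/Sydney'),
--     ('64', 'Pacific/Auckland'), ('81', 'Asia/Tokyo'), ('86', 'Asia/Shanghai'),
--     ('91', 'Asia/Kolkata'), ('65', 'Asia/Singapore'), ('852', 'Asia/Hong_Kong'),
--     ('66', 'Asia/Bangkok'), ('63', 'Asia/Manila'), ('62', 'Asia/Jakarta'),
--     ('60', 'Asia/Kuala_Lumpur'), ('84', 'Asia/Ho_Chi_Minh'), ('82', 'Asia/Seoul'),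
--     ('971', 'Asia/Dubai'), ('966', 'Asia/Riyadh'), ('972', 'Asia/Jerusalem'),
--     ('90', 'Europe/Istanbul'), ('27', 'Africa/Johannesburg'), ('20', 'Africa/Cairo'),
--     ('234', 'Africa/Lagos'), ('254', 'Africa/Nairobi'),
-- ]
--
--
-- def get_timezone_from_phone(phone: str) -> str:
--     """Get timezone based on phone country code (FALLBACK ONLY)"""
--     cleaned = ''.join(ch for ch in phone if ch not in '+ -')
--     best_len = 0
--     best_tz = 'UTC'
--     for code, tz in _TZ_ITEMS:
--         if len(code) > best_len and cleaned.startswith(code):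
--             best_len = len(code)
--             best_tz = tz
--     return best_tz
-- ===== Notes on version B (the rewrite author's own statement) =====
-- stated objective: alternative
-- what changed: Replaced the three fixed-length prefix probes into a dict (slice phone_clean[:3],[:2],[:1], test each) with a single longest-prefix-wins scan over a list of (code, tz) pairs, and replaced the three chained str.replace cleaning passes with one filtering join.
import Mathlib
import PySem

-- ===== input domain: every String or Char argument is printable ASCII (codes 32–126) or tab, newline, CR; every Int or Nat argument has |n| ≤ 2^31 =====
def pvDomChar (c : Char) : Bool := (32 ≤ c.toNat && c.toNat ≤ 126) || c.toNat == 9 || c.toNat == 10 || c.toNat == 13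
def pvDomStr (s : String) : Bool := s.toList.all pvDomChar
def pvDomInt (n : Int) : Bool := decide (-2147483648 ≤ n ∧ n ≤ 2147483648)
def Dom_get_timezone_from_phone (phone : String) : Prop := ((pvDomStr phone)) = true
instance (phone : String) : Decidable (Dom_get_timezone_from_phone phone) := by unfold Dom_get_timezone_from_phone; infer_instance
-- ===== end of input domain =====

-- B replaces A's three chained replace passes with one filtering pass and A's three
-- fixed-length dict probes with a single longest-prefix-wins scan over a list of
-- (code, timezone) pairs (objective: alternative algorithm, same cost).
-- ===== PORT A =====
-- phone.replace('+', '').replace(' ', '').replace('-', '')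
def pvClean (phone : String) : List Char :=
  PySem.Chars.replace (PySem.Chars.replace (PySem.Chars.replace phone.toList ['+'] []) [' '] []) ['-'] []

def tzPairs : List (List Char × String) := [
  (['3', '1'], "Europe/Amsterdam"),
  (['3', '2'], "Europe/Brussels"),
  (['3', '3'], "Europe/Paris"),
  (['3', '4'], "Europe/Madrid"),
  (['3', '9'], "Europe/Rome"),
  (['4', '4'], "Europe/London"),
  (['4', '9'], "Europe/Berlin"),
  (['4', '6'], "Europe/Stockholm"),
  (['4', '7'], "Europe/Oslo"),
  (['4', '5'], "Europe/Copenhagen"),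
  (['3', '5', '8'], "Europe/Helsinki"),
  (['4', '8'], "Europe/Warsaw"),
  (['4', '3'], "Europe/Vienna"),
  (['4', '1'], "Europe/Zurich"),
  (['3', '5', '1'], "Europe/Lisbon"),
  (['3', '0'], "Europe/Athens"),
  (['3', '5', '3'], "Europe/Dublin"),
  (['1'], "America/New_York"),
  (['5', '2'], "America/Mexico_City"),
  (['5', '5'], "America/Sao_Paulo"),
  (['5', '4'], "America/Argentina/Buenos_Aires"),
  (['5', '6'], "America/Santiago"),
  (['5', '7'], "America/Bogota"),
  (['5', '1'], "America/Lima"),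
  (['6', '1'], "Australia/Sydney"),
  (['6', '4'], "Pacific/Auckland"),
  (['8', '1'], "Asia/Tokyo"),
  (['8', '6'], "Asia/Shanghai"),
  (['9', '1'], "Asia/Kolkata"),
  (['6', '5'], "Asia/Singapore"),
  (['8', '5', '2'], "Asia/Hong_Kong"),
  (['6', '6'], "Asia/Bangkok"),
  (['6', '3'], "Asia/Manila"),
  (['6', '2'], "Asia/Jakarta"),
  (['6', '0'], "Asia/Kuala_Lumpur"),
  (['8', '4'], "Asia/Ho_Chi_Minh"),
  (['8', '2'], "Asia/Seoul"),
  (['9', '7', '1'], "Asia/Dubai"),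
  (['9', '6', '6'], "Asia/Riyadh"),
  (['9', '7', '2'], "Asia/Jerusalem"),
  (['9', '0'], "Europe/Istanbul"),
  (['2', '7'], "Africa/Johannesburg"),
  (['2', '0'], "Africa/Cairo"),
  (['2', '3', '4'], "Africa/Lagos"),
  (['2', '5', '4'], "Africa/Nairobi")
]
-- the dict literal: its 45 keys are pairwise distinct, so its items list is tzPairs itself
-- (PySem.Dict.ofList tzPairs evaluates to exactly this; stated directly to keep terms small)
def tzDict : PySem.Dict (List Char) String := PySem.Dict.mk tzPairs

-- the 'for length in [3, 2, 1]' loop with its early 'return': recursion over the list of lengths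
def probeA (clean : List Char) : List Nat → String
  | [] => "UTC"
  | k :: ks =>
    -- code = phone_clean[:length]; 'code in timezone_map: return timezone_map[code]'
    match tzDict.get? (PySem.List.slice clean none (some (k : Int))) with
    | some t => t
    | none => probeA clean ks

def get_timezone_from_phone (phone : String) : String :=
  probeA (pvClean phone) [3, 2, 1]

-- ===== PORT B =====
-- B's table: a plain list of (code, timezone) string pairs, scanned once
def tzTable : List (String × String) := [
  ("31", "Europe/Amsterdam"), ("32", "Europe/Brussels"), ("33", "Europe/Paris"),
  ("34", "Europe/Madrid"), ("39", "Europe/Rome"), ("44", "Europe/London"),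
  ("49", "Europe/Berlin"), ("46", "Europe/Stockholm"), ("47", "Europe/Oslo"),
  ("45", "Europe/Copenhagen"), ("358", "Europe/Helsinki"), ("48", "Europe/Warsaw"),
  ("43", "Europe/Vienna"), ("41", "Europe/Zurich"), ("351", "Europe/Lisbon"),
  ("30", "Europe/Athens"), ("353", "Europe/Dublin"), ("1", "America/New_York"),
  ("52", "America/Mexico_City"), ("55", "America/Sao_Paulo"),
  ("54", "America/Argentina/Buenos_Aires"), ("56", "America/Santiago"),
  ("57", "America/Bogota"), ("51", "America/Lima"), ("61", "Australia/Sydney"),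
  ("64", "Pacific/Auckland"), ("81", "Asia/Tokyo"), ("86", "Asia/Shanghai"),
  ("91", "Asia/Kolkata"), ("65", "Asia/Singapore"), ("852", "Asia/Hong_Kong"),
  ("66", "Asia/Bangkok"), ("63", "Asia/Manila"), ("62", "Asia/Jakarta"),
  ("60", "Asia/Kuala_Lumpur"), ("84", "Asia/Ho_Chi_Minh"), ("82", "Asia/Seoul"),
  ("971", "Asia/Dubai"), ("966", "Asia/Riyadh"), ("972", "Asia/Jerusalem"),
  ("90", "Europe/Istanbul"), ("27", "Africa/Johannesburg"), ("20", "Africa/Cairo"),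
  ("234", "Africa/Lagos"), ("254", "Africa/Nairobi")
]

-- cleaned = ''.join(ch for ch in phone if ch not in '+ -'): one filtering pass
def cleanB (phone : String) : List Char :=
  phone.toList.filter (fun ch => !(['+', ' ', '-'].contains ch))

-- the loop body: if len(code) > best_len and cleaned.startswith(code): best_len, best_tz = len(code), tz
def gstepB (clean : List Char) (acc : Nat × String) (e : String × String) : Nat × String :=
  if e.1.toList.length > acc.1 ∧ PySem.Chars.startswith clean e.1.toList then (e.1.toList.length, e.2) else acc

def get_timezone_from_phone_alt (phone : String) : String :=
  (tzTable.foldl (gstepB (cleanB phone)) (0, "UTC")).2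

-- ===== PRECONDITION & SPEC =====
def Spec_get_timezone_from_phone (phone : String) (out : String) : Prop := out = get_timezone_from_phone_alt phone
instance (phone : String) (out : String) : Decidable (Spec_get_timezone_from_phone phone out) := by unfold Spec_get_timezone_from_phone; infer_instance

-- ===== CLAIM (what is proved, stated in full; the proofs are below) =====
def Claim_equal_get_timezone_from_phone : Prop := ∀ (phone : String), Dom_get_timezone_from_phone phone → Spec_get_timezone_from_phone phone (get_timezone_from_phone phone)

-- ===== LEMMAS AND PROOFS =====

-- B's step, re-expressed over char-list codes
def gstep (clean : List Char) (acc : Nat × String) (e : List Char × String) : Nat × String :=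
  if e.1.length > acc.1 ∧ PySem.Chars.startswith clean e.1 then (e.1.length, e.2) else acc

-- replacing a single character by nothing is filtering it out
lemma replace_go_single (c : Char) :
    ∀ (fuel : Nat) (l acc : List Char), l.length ≤ fuel →
    PySem.Chars.replace.go [c] [] fuel l acc = acc.reverse ++ l.filter (fun x => x != c) := by
  intro fuel
  induction fuel with
  | zero =>
    intro l acc h
    have : l = [] := List.eq_nil_of_length_eq_zero (Nat.le_zero.mp h)
    subst this; simp [PySem.Chars.replace.go]
  | succ n ih =>
    intro l acc h
    cases l with
    | nil => simp [PySem.Chars.replace.go]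
    | cons x t =>
      simp only [PySem.Chars.replace.go]
      by_cases hx : x = c
      · subst hx
        have hp : [x].isPrefixOf (x :: t) = true := by simp [List.isPrefixOf]
        rw [if_pos hp]
        simp only [List.length_cons] at h
        simp only [show ([x] : List Char).length = 1 from rfl, List.drop_succ_cons,
          List.drop_zero, List.reverse_nil, List.nil_append]
        rw [ih t acc (by omega)]
        simp [List.filter]
      · have hp : [c].isPrefixOf (x :: t) = false := by
          simp [List.isPrefixOf]; exact fun hc => absurd hc.symm hx
        rw [if_neg (by simp [hp])]
        simp only [List.length_cons] at h
        rw [ih t (x :: acc) (by omega)]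
        have hb : (x != c) = true := by simp [hx]
        simp [List.filter, hb]

lemma replace_single (c : Char) (l : List Char) :
    PySem.Chars.replace l [c] [] = l.filter (fun x => x != c) := by
  simp only [PySem.Chars.replace, List.isEmpty]
  exact replace_go_single c l.length l [] le_rfl

-- B's one filtering pass equals A's three replace passes
lemma clean_eq (phone : String) : cleanB phone = pvClean phone := by
  unfold cleanB pvClean
  rw [replace_single, replace_single, replace_single, List.filter_filter, List.filter_filter]
  apply List.filter_congr
  intro x _
  simp only [List.contains_cons, List.contains_nil, Bool.or_false]
  cases h1 : x == '+' <;> cases h2 : x == ' ' <;> cases h3 : x == '-' <;>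
    simp_all [bne, BEq.comm]

lemma table_map : tzTable.map (fun e => (e.1.toList, e.2)) = tzPairs := by decide

lemma fold_bridge (clean : List Char) (acc : Nat × String) :
    tzTable.foldl (gstepB clean) acc = tzPairs.foldl (gstep clean) acc := by
  rw [← table_map, List.foldl_map]
  rfl

-- first table entry (if any) whose code has length k and is a prefix of clean
def mk? (clean : List Char) (k : Nat) (L : List (List Char × String)) : Option (List Char × String) :=
  L.find? (fun e => e.1.length == k && PySem.Chars.startswith clean e.1)

-- apply one optional length-k match to the running best (strict >)
def upd (acc : Nat × String) (k : Nat) (o : Option (List Char × String)) : Nat × String :=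
  match o with
  | some e => if k > acc.1 then (k, e.2) else acc
  | none => acc

set_option maxRecDepth 4096 in
lemma tzlens : ∀ e ∈ tzPairs, 1 ≤ e.1.length ∧ e.1.length ≤ 3 := by decide

-- B's loop, characterised: the three per-length first matches applied in increasing length order
lemma fold_upd (clean : List Char) (L : List (List Char × String))
    (hL : ∀ e ∈ L, 1 ≤ e.1.length ∧ e.1.length ≤ 3) : ∀ acc : Nat × String,
    L.foldl (gstep clean) acc =
      upd (upd (upd acc 1 (mk? clean 1 L)) 2 (mk? clean 2 L)) 3 (mk? clean 3 L) := by
  induction L with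
  | nil => intro acc; simp [mk?, upd]
  | cons e L ih =>
    intro acc
    have he := hL e (by simp)
    have ih' := ih (fun x hx => hL x (by simp [hx]))
    obtain ⟨k, t⟩ := e
    simp only [List.foldl_cons]
    rw [ih']
    rcases k with _ | ⟨x, k⟩
    · simp at he
    rcases k with _ | ⟨y, k⟩
    case nil =>
      by_cases hsw : PySem.Chars.startswith clean [x] = true
      · simp only [mk?, List.find?_cons, gstep]
        simp [hsw]
        cases hm1 : List.find? (fun e => e.1.length == 1 && PySem.Chars.startswith clean e.1) L <;>
          cases hm2 : List.find? (fun e => e.1.length == 2 && PySem.Chars.startswith clean e.1) L <;>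
          cases hm3 : List.find? (fun e => e.1.length == 3 && PySem.Chars.startswith clean e.1) L <;>
          simp [upd, apply_ite Prod.fst] <;> split_ifs <;> solve | rfl | contradiction | omega | simp
      · simp only [mk?, List.find?_cons, gstep]
        simp [hsw]
    rcases k with _ | ⟨z, k⟩
    case nil =>
      by_cases hsw : PySem.Chars.startswith clean [x, y] = true
      · simp only [mk?, List.find?_cons, gstep]
        simp [hsw]
        cases hm1 : List.find? (fun e => e.1.length == 1 && PySem.Chars.startswith clean e.1) L <;>
          cases hm2 : List.find? (fun e => e.1.length == 2 && PySem.Chars.startswith clean e.1) L <;>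
          cases hm3 : List.find? (fun e => e.1.length == 3 && PySem.Chars.startswith clean e.1) L <;>
          simp [upd, apply_ite Prod.fst] <;> split_ifs <;> solve | rfl | contradiction | omega
      · simp only [mk?, List.find?_cons, gstep]
        simp [hsw]
    rcases k with _ | ⟨w, k⟩
    case nil =>
      by_cases hsw : PySem.Chars.startswith clean [x, y, z] = true
      · simp only [mk?, List.find?_cons, gstep]
        simp [hsw]
        cases hm1 : List.find? (fun e => e.1.length == 1 && PySem.Chars.startswith clean e.1) L <;>
          cases hm2 : List.find? (fun e => e.1.length == 2 && PySem.Chars.startswith clean e.1) L <;>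
          cases hm3 : List.find? (fun e => e.1.length == 3 && PySem.Chars.startswith clean e.1) L <;>
          simp [upd, apply_ite Prod.fst] <;> split_ifs <;> solve | rfl | contradiction | omega
      · simp only [mk?, List.find?_cons, gstep]
        simp [hsw]
    · simp at he; omega

lemma alt_eq (phone : String) :
    get_timezone_from_phone_alt phone =
      (upd (upd (upd (0, "UTC") 1 (mk? (pvClean phone) 1 tzPairs))
        2 (mk? (pvClean phone) 2 tzPairs)) 3 (mk? (pvClean phone) 3 tzPairs)).2 := by
  unfold get_timezone_from_phone_alt
  rw [clean_eq, fold_bridge, fold_upd (pvClean phone) tzPairs tzlens]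

-- A, rewritten as three association-list probes on the prefixes of clean
set_option maxRecDepth 100000 in
lemma a_eq (phone : String) :
    get_timezone_from_phone phone =
      (match (tzPairs.find? (fun e => e.1 == (pvClean phone).take 3)).map Prod.snd with
       | some t => t
       | none =>
        match (tzPairs.find? (fun e => e.1 == (pvClean phone).take 2)).map Prod.snd with
        | some t => t
        | none =>
          match (tzPairs.find? (fun e => e.1 == (pvClean phone).take 1)).map Prod.snd with
          | some t => t
          | none => "UTC") := by
  unfold get_timezone_from_phone
  simp only [probeA, tzDict, PySem.Dict.get?, PySem.List.slice_to_natCast]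

-- the length-k-prefix test against a code, resolved per shape of clean
lemma pred1 (e1 : List Char) (a : Char) (r : List Char) :
    (e1.length == 1 && PySem.Chars.startswith (a :: r) e1) = (e1 == [a]) := by
  rcases e1 with _ | ⟨x, _ | ⟨y, s⟩⟩ <;> simp [PySem.Chars.startswith, List.isPrefixOf]

lemma pred2 (e1 : List Char) (a b : Char) (r : List Char) :
    (e1.length == 2 && PySem.Chars.startswith (a :: b :: r) e1) = (e1 == [a, b]) := by
  rcases e1 with _ | ⟨x, _ | ⟨y, _ | ⟨z, s⟩⟩⟩ <;> simp [PySem.Chars.startswith, List.isPrefixOf]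

lemma pred3 (e1 : List Char) (a b c : Char) (r : List Char) :
    (e1.length == 3 && PySem.Chars.startswith (a :: b :: c :: r) e1) = (e1 == [a, b, c]) := by
  rcases e1 with _ | ⟨x, _ | ⟨y, _ | ⟨z, _ | ⟨w, s⟩⟩⟩⟩ <;>
    simp [PySem.Chars.startswith, List.isPrefixOf]

lemma pred2short (e1 : List Char) (a : Char) :
    (e1.length == 2 && PySem.Chars.startswith [a] e1) = false := by
  rcases e1 with _ | ⟨x, _ | ⟨y, s⟩⟩ <;> simp [PySem.Chars.startswith, List.isPrefixOf]

lemma pred3short1 (e1 : List Char) (a : Char) :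
    (e1.length == 3 && PySem.Chars.startswith [a] e1) = false := by
  rcases e1 with _ | ⟨x, _ | ⟨y, s⟩⟩ <;> simp [PySem.Chars.startswith, List.isPrefixOf]

lemma pred3short2 (e1 : List Char) (a b : Char) :
    (e1.length == 3 && PySem.Chars.startswith [a, b] e1) = false := by
  rcases e1 with _ | ⟨x, _ | ⟨y, _ | ⟨z, s⟩⟩⟩ <;> simp [PySem.Chars.startswith, List.isPrefixOf]

-- the two characterisations agree, by cases on how much of clean exists
lemma main_eq (clean : List Char) :
    (match (tzPairs.find? (fun e => e.1 == clean.take 3)).map Prod.snd with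
     | some t => t
     | none =>
      match (tzPairs.find? (fun e => e.1 == clean.take 2)).map Prod.snd with
      | some t => t
      | none =>
        match (tzPairs.find? (fun e => e.1 == clean.take 1)).map Prod.snd with
        | some t => t
        | none => "UTC")
    = (upd (upd (upd (0, "UTC") 1 (mk? clean 1 tzPairs)) 2 (mk? clean 2 tzPairs)) 3 (mk? clean 3 tzPairs)).2 := by
  rcases clean with _ | ⟨a, _ | ⟨b, _ | ⟨c, r⟩⟩⟩
  · rfl
  · have h3 : mk? [a] 3 tzPairs = none := by
      simp only [mk?]
      rw [show (fun e : List Char × String => e.1.length == 3 && PySem.Chars.startswith [a] e.1)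
            = (fun _ => false) from funext (fun e => pred3short1 e.1 a)]
      simp
    have h2 : mk? [a] 2 tzPairs = none := by
      simp only [mk?]
      rw [show (fun e : List Char × String => e.1.length == 2 && PySem.Chars.startswith [a] e.1)
            = (fun _ => false) from funext (fun e => pred2short e.1 a)]
      simp
    have h1 : mk? [a] 1 tzPairs = tzPairs.find? (fun e => e.1 == [a]) := by
      simp only [mk?]
      exact congrArg (fun p => List.find? p tzPairs) (funext (fun e : List Char × String => pred1 e.1 a []))
    rw [h1, h2, h3]
    simp only [List.take]
    cases hf : tzPairs.find? (fun e => e.1 == [a]) <;> simp [upd]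
  · have h3 : mk? [a, b] 3 tzPairs = none := by
      simp only [mk?]
      rw [show (fun e : List Char × String => e.1.length == 3 && PySem.Chars.startswith [a, b] e.1)
            = (fun _ => false) from funext (fun e => pred3short2 e.1 a b)]
      simp
    have h2 : mk? [a, b] 2 tzPairs = tzPairs.find? (fun e => e.1 == [a, b]) := by
      simp only [mk?]
      exact congrArg (fun p => List.find? p tzPairs) (funext (fun e : List Char × String => pred2 e.1 a b []))
    have h1 : mk? [a, b] 1 tzPairs = tzPairs.find? (fun e => e.1 == [a]) := by
      simp only [mk?]
      exact congrArg (fun p => List.find? p tzPairs) (funext (fun e : List Char × String => pred1 e.1 a [b]))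
    rw [h1, h2, h3]
    simp only [List.take]
    cases hf2 : tzPairs.find? (fun e => e.1 == [a, b]) <;>
      cases hf1 : tzPairs.find? (fun e => e.1 == [a]) <;> simp [upd]
  · have h3 : mk? (a :: b :: c :: r) 3 tzPairs = tzPairs.find? (fun e => e.1 == [a, b, c]) := by
      simp only [mk?]
      exact congrArg (fun p => List.find? p tzPairs) (funext (fun e : List Char × String => pred3 e.1 a b c r))
    have h2 : mk? (a :: b :: c :: r) 2 tzPairs = tzPairs.find? (fun e => e.1 == [a, b]) := by
      simp only [mk?]
      exact congrArg (fun p => List.find? p tzPairs) (funext (fun e : List Char × String => pred2 e.1 a b (c :: r)))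
    have h1 : mk? (a :: b :: c :: r) 1 tzPairs = tzPairs.find? (fun e => e.1 == [a]) := by
      simp only [mk?]
      exact congrArg (fun p => List.find? p tzPairs) (funext (fun e : List Char × String => pred1 e.1 a (b :: c :: r)))
    rw [h1, h2, h3]
    simp only [List.take]
    cases hf3 : tzPairs.find? (fun e => e.1 == [a, b, c]) <;>
      cases hf2 : tzPairs.find? (fun e => e.1 == [a, b]) <;>
      cases hf1 : tzPairs.find? (fun e => e.1 == [a]) <;> simp [upd]

-- ===== VERDICT (by name: the statement is the Claim_ definition above) =====
theorem get_timezone_from_phone_spec : Claim_equal_get_timezone_from_phone := by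
  intro phone _
  unfold Spec_get_timezone_from_phone
  rw [alt_eq, a_eq, main_eq]
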